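-- pv_equiv track=rewrite | github.com/rhordoan/drag-improved | src/pipeline/resolve_optimized.py | _cluster_entities_simple
-- ===== SOURCE A (Python) =====
-- from typing import Dict, List, Optional, Set, Tuple
--
-- def _cluster_entities_simple(
--     n_entities: int,
--     similar_pairs: List[Tuple[int, int, float]],
-- ) -> List[List[int]]:
--     """Simple union-find clustering as fallback."""
--     # Initialize each entity as its own cluster
--     parent = list(range(n_entities))
--
--     def find(x):
--         if parent[x] != x:
--             parent[x] = find(parent[x])  # Path compression
--         return parent[x]
--
--     def union(x, y):
--         px, py = find(x), find(y)
--         if px != py: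
--             parent[px] = py
--
--     # Union similar entities
--     for i, j, _ in similar_pairs:
--         union(i, j)
--
--     # Group by root
--     clusters_dict = {}
--     for i in range(n_entities):
--         root = find(i)
--         if root not in clusters_dict:
--             clusters_dict[root] = []
--         clusters_dict[root].append(i)
--
--     return list(clusters_dict.values())
-- ===== SOURCE B (Python) =====
-- from typing import List, Tuple
--
-- def _cluster_entities_simple(
--     n_entities: int,
--     similar_pairs: List[Tuple[int, int, float]],
-- ) -> List[List[int]]:
--     """Label-propagation clustering: a flat label array instead of a parent forest.
--
--     Each entity carries the id of its cluster representative; merging two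
--     clusters rewrites one label into the other across the array (no trees,
--     no recursion)."""
--     labels = list(range(n_entities))
--     for i, j, _ in similar_pairs:
--         a, b = labels[i], labels[j]
--         if a != b:
--             labels = [b if l == a else l for l in labels]
--     clusters = {}
--     for i, l in enumerate(labels):
--         clusters.setdefault(l, []).append(i)
--     return list(clusters.values())
-- ===== Notes on version B (the rewrite author's own statement) =====
-- stated objective: simpler
-- what changed: Replaced the recursive path-compressing union-find forest by a flat label array (each merge rewrites one label into the other across the array) and the contains-check/insert/append grouping by enumerate + setdefault.
import Mathlib
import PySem

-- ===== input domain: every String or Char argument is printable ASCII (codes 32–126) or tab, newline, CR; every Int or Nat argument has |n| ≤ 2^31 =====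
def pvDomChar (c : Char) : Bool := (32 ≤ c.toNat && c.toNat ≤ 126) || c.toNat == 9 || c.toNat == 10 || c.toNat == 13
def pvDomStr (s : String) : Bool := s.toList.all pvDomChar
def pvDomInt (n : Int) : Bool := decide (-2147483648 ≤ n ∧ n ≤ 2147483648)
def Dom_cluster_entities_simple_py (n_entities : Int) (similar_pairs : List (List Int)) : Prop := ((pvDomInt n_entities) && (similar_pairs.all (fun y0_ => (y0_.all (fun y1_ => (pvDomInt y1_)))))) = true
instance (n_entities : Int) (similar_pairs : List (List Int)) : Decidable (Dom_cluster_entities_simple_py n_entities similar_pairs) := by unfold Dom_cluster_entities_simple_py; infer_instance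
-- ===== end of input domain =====

-- B replaces the recursive path-compressed union-find forest of A by a flat label
-- array that is rewritten on each merge (simpler: no recursion, no tree); same
-- return value on every input admitted by Pre_.

-- ===== PORT A =====
-- `find(x)` with path compression.  The fuel only bounds the structural recursion:
-- on every input admitted by Pre_ the parent forest is acyclic and the fuel
-- (length+1 at each call site) is proved sufficient.  A `none` from pyGet? is
-- Python's IndexError, excluded by Pre_ (junk value returned there).
def pvFindA (fuel : Nat) (parent : List Int) (x : Int) : Int × List Int :=
  match fuel with
  | 0 => (0, parent)
  | fuel + 1 =>
    match PySem.List.pyGet? parent x with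
    | none => (0, parent)
    | some px =>
      if px ≠ x then
        let r := pvFindA fuel parent px                  -- parent[x] = find(parent[x])
        let parent' := PySem.List.pySetD r.2 x r.1
        (PySem.List.pyGetD parent' x 0, parent')         -- return parent[x]
      else (px, parent)                                  -- return parent[x] (= x)

def pvUnionA (parent : List Int) (x y : Int) : List Int :=
  let rx := pvFindA (parent.length + 1) parent x
  let ry := pvFindA (rx.2.length + 1) rx.2 y
  if rx.1 ≠ ry.1 then PySem.List.pySetD ry.2 rx.1 ry.1 else ry.2

-- loop body of `for i, j, _ in similar_pairs: union(i, j)` (a pair of length ≠ 3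
-- is Python's ValueError on unpacking, excluded by Pre_; skipped here)
def pvLoopA (parent : List Int) (pair : List Int) : List Int :=
  match pair with
  | [i, j, _w] => pvUnionA parent i j
  | _ => parent

-- loop body of the grouping loop: root = find(i); clusters_dict[root].append(i)
def pvGroupA (st : PySem.Dict Int (List Int) × List Int) (i : Int) :
    PySem.Dict Int (List Int) × List Int :=
  let r := pvFindA (st.2.length + 1) st.2 i
  let dct := if st.1.contains r.1 then st.1 else st.1.insert r.1 []
  (dct.modify r.1 [] (· ++ [i]), r.2)

def cluster_entities_simple_py (n_entities : Int) (similar_pairs : List (List Int)) : List (List Int) :=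
  let parent := PySem.List.pyRange 0 n_entities 1        -- parent = list(range(n_entities))
  let parent := similar_pairs.foldl pvLoopA parent
  let st := (PySem.List.pyRange 0 n_entities 1).foldl pvGroupA (PySem.Dict.empty, parent)
  st.1.values

-- ===== PORT B =====
-- loop body of `for i, j, _ in similar_pairs` in B (same exclusions as in A)
def pvLoopB (labels : List Int) (pair : List Int) : List Int :=
  match pair with
  | [i, j, _w] =>
    match PySem.List.pyGet? labels i, PySem.List.pyGet? labels j with
    | some a, some b =>
      if a ≠ b then labels.map (fun l => if l = a then b else l) else labels
    | _, _ => labels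
  | _ => labels

-- clusters.setdefault(l, []).append(i)  ==  modify l [] (· ++ [i])
def pvGroupB (d : PySem.Dict Int (List Int)) (p : Int × Int) : PySem.Dict Int (List Int) :=
  d.modify p.2 [] (· ++ [p.1])

def cluster_entities_simple_py_alt (n_entities : Int) (similar_pairs : List (List Int)) : List (List Int) :=
  let labels := PySem.List.pyRange 0 n_entities 1        -- labels = list(range(n_entities))
  let labels := similar_pairs.foldl pvLoopB labels
  let clusters := (PySem.List.enumerate labels).foldl pvGroupB PySem.Dict.empty
  clusters.values

-- ===== PRECONDITION & SPEC =====
-- Exactly the inputs on which the Python A returns normally: every pair unpacks as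
-- i, j, _ (length 3) and both indices are in range for the parent array of length
-- max(n_entities, 0) (Python's negative indexing included).
def Pre_cluster_entities_simple_py (n_entities : Int) (similar_pairs : List (List Int)) : Prop :=
  ∀ p ∈ similar_pairs, p.length = 3 ∧
    PySem.Raise.InRange n_entities.toNat (p.getD 0 0) ∧
    PySem.Raise.InRange n_entities.toNat (p.getD 1 0)
instance (n_entities : Int) (similar_pairs : List (List Int)) : Decidable (Pre_cluster_entities_simple_py n_entities similar_pairs) := by unfold Pre_cluster_entities_simple_py; infer_instance

def pvWitness_cluster_entities_simple_py : Int × List (List Int) := (4, [[0, 2, 1], [-1, 2, 0]])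

def Spec_cluster_entities_simple_py (n_entities : Int) (similar_pairs : List (List Int)) (out : List (List Int)) : Prop := out = cluster_entities_simple_py_alt n_entities similar_pairs
instance (n_entities : Int) (similar_pairs : List (List Int)) (out : List (List Int)) : Decidable (Spec_cluster_entities_simple_py n_entities similar_pairs out) := by unfold Spec_cluster_entities_simple_py; infer_instance

-- ===== CLAIM (what is proved, stated in full; the proofs are below) =====
def Claim_equal_cluster_entities_simple_py : Prop := ∀ (n_entities : Int) (similar_pairs : List (List Int)), Dom_cluster_entities_simple_py n_entities similar_pairs → Pre_cluster_entities_simple_py n_entities similar_pairs → Spec_cluster_entities_simple_py n_entities similar_pairs (cluster_entities_simple_py n_entities similar_pairs)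

-- ===== LEMMAS AND PROOFS =====

-- l[k] as Python reads it through getD (index already normalised to 0 ≤ k < len)
def pvGet (l : List Int) (k : Nat) : Int := l.getD k 0

-- the normalised (Python) index: negative indices count from the end
def pvNIdx (n : Nat) (i : Int) : Nat := if 0 ≤ i then i.toNat else n - (-i).toNat

-- The bisimulation invariant between A's parent forest and B's label array:
-- labels are constant along parent edges, every label is a root, roots are
-- labelled by themselves, and `d` certifies acyclicity, bounded by component size.
structure pvInv (parent labels : List Int) (d : Nat → Nat) : Prop where
  len  : parent.length = labels.length
  rng  : ∀ k, k < parent.length → 0 ≤ pvGet parent k ∧ pvGet parent k < (parent.length : Int)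
  lrng : ∀ k, k < parent.length → 0 ≤ pvGet labels k ∧ pvGet labels k < (parent.length : Int)
  lab  : ∀ k, k < parent.length → pvGet labels (pvGet parent k).toNat = pvGet labels k
  root : ∀ k, k < parent.length → pvGet parent (pvGet labels k).toNat = pvGet labels k
  fix  : ∀ k, k < parent.length → pvGet parent k = (k : Int) → pvGet labels k = (k : Int)
  idem : ∀ k, k < parent.length → pvGet labels (pvGet labels k).toNat = pvGet labels k
  wf   : ∀ k, k < parent.length → pvGet parent k ≠ (k : Int) → d (pvGet parent k).toNat < d k
  bnd  : ∀ k, k < parent.length → d k < labels.count (pvGet labels k)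

lemma pvGet_eq (l : List Int) (k : Nat) (h : k < l.length) : pvGet l k = l[k] := by
  simp [pvGet, List.getD_eq_getElem?_getD, List.getElem?_eq_getElem h]

lemma pvGet_set_self (l : List Int) (k : Nat) (v : Int) (h : k < l.length) :
    pvGet (l.set k v) k = v := by
  simp [pvGet, List.getD_eq_getElem?_getD, h]

lemma pvGet_set_ne (l : List Int) (k m : Nat) (v : Int) (h : m ≠ k) :
    pvGet (l.set k v) m = pvGet l m := by
  simp [pvGet, List.getD_eq_getElem?_getD, List.getElem?_set_ne (by omega : k ≠ m)]

lemma pvGet_map (l : List Int) (f : Int → Int) (k : Nat) (h : k < l.length) :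
    pvGet (l.map f) k = f (pvGet l k) := by
  simp [pvGet, List.getD_eq_getElem?_getD, h]

lemma pvNIdx_lt (n : Nat) (i : Int) (h : PySem.Raise.InRange n i) : pvNIdx n i < n := by
  obtain ⟨h1, h2⟩ := h
  unfold pvNIdx; split <;> omega

lemma pvNIdx_of_nonneg (n : Nat) (i : Int) (h : 0 ≤ i) : pvNIdx n i = i.toNat := by
  simp [pvNIdx, h]

lemma pvNIdx_natCast (n : Nat) (k : Nat) : pvNIdx n (k : Int) = k := by
  simp [pvNIdx]

lemma pvIdx?_eq (n : Nat) (i : Int) (h : PySem.Raise.InRange n i) :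
    PySem.List.pyIdx? n i = some (pvNIdx n i) := by
  obtain ⟨h1, h2⟩ := h
  unfold PySem.List.pyIdx? pvNIdx
  split_ifs <;> simp_all

lemma pvGet?_norm (l : List Int) (i : Int) (h : PySem.Raise.InRange l.length i) :
    PySem.List.pyGet? l i = some (pvGet l (pvNIdx l.length i)) := by
  have hk := pvNIdx_lt l.length i h
  simp [PySem.List.pyGet?, pvIdx?_eq _ _ h, List.getElem?_eq_getElem hk, pvGet_eq _ _ hk]

lemma pvGetD_norm (l : List Int) (i : Int) (d0 : Int) (h : PySem.Raise.InRange l.length i) :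
    PySem.List.pyGetD l i d0 = pvGet l (pvNIdx l.length i) := by
  simp [PySem.List.pyGetD, pvGet?_norm l i h]

lemma pvSetD_norm (l : List Int) (i : Int) (v : Int) (h : PySem.Raise.InRange l.length i) :
    PySem.List.pySetD l i v = l.set (pvNIdx l.length i) v := by
  simp [PySem.List.pySetD, PySem.List.pySet?, pvIdx?_eq _ _ h]

lemma pvCount_map_self (l : List Int) (a b : Int) (hab : a ≠ b) :
    (l.map (fun x => if x = a then b else x)).count b = l.count a + l.count b := by
  induction l with
  | nil => simp
  | cons x t ih =>
    simp only [List.map_cons, List.count_cons, ih, beq_iff_eq]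
    split_ifs <;> omega

lemma pvCount_map_ne (l : List Int) (a b c : Int) (hca : c ≠ a) (hcb : c ≠ b) :
    (l.map (fun x => if x = a then b else x)).count c = l.count c := by
  induction l with
  | nil => simp
  | cons x t ih =>
    simp only [List.map_cons, List.count_cons, ih, beq_iff_eq]
    split_ifs <;> omega

-- path compression at index k (set to the final root r = labels[k]) preserves pvInv
lemma pvInv_compress (parent labels : List Int) (d : Nat → Nat)
    (hInv : pvInv parent labels d) (k : Nat) (hk : k < parent.length) (r : Int)
    (hr : r = pvGet labels k) (hd : r = (k : Int) ∨ d r.toNat < d k) :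
    pvInv (parent.set k r) labels d := by
  obtain ⟨len, rng, lrng, lab, root, fix, idem, wf, bnd⟩ := hInv
  have hlen : (parent.set k r).length = parent.length := by simp
  have hget : ∀ m : Nat, pvGet (parent.set k r) m = if m = k then r else pvGet parent m := by
    intro m
    by_cases hmk : m = k
    · subst hmk; simp [pvGet_set_self _ _ _ hk]
    · simp [pvGet_set_ne _ _ _ _ hmk, hmk]
  refine ⟨by simpa using len, ?_, ?_, ?_, ?_, ?_, ?_, ?_, ?_⟩ <;> simp only [hlen]
  · intro m hm
    rw [hget m]; split
    · exact hr ▸ lrng k hk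
    · exact rng m hm
  · exact lrng
  · intro m hm
    rw [hget m]; split
    · rename_i hmk
      rw [hr, idem k hk, hmk]
    · exact lab m hm
  · intro m hm
    rw [hget ((pvGet labels m).toNat)]; split
    · rename_i hck
      -- (labels m).toNat = k, so labels m = ↑k and r = labels k = labels m
      have h0 : 0 ≤ pvGet labels m := (lrng m hm).1
      have hc : pvGet labels m = (k : Int) := by omega
      rw [hr, ← hck, idem m hm, hc]
    · exact root m hm
  · intro m hm hp
    rw [hget m] at hp; split at hp
    · rename_i hmk
      rw [hmk] at hp ⊢; rw [hr] at hp; exact hp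
    · exact fix m hm hp
  · exact idem
  · intro m hm
    rw [hget m]; split
    · rename_i hmk
      rw [hmk]
      intro hp
      rcases hd with h | h
      · exact absurd h hp
      · exact h
    · exact wf m hm
  · exact bnd

-- `find` returns the label of (the normalised) x, preserves the invariant
-- (same labels, same certificate d), preserves length, and does not increase d.
lemma pvFindA_spec (labels : List Int) (d : Nat → Nat) :
    ∀ (fuel : Nat) (parent : List Int) (x : Int),
    pvInv parent labels d →
    PySem.Raise.InRange parent.length x →
    (if 0 ≤ x then d (pvNIdx parent.length x) + 1 else d (pvNIdx parent.length x) + 2) ≤ fuel →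
    (pvFindA fuel parent x).1 = pvGet labels (pvNIdx parent.length x) ∧
    pvInv (pvFindA fuel parent x).2 labels d ∧
    (pvFindA fuel parent x).2.length = parent.length ∧
    d (pvGet labels (pvNIdx parent.length x)).toNat ≤ d (pvNIdx parent.length x) := by
  intro fuel
  induction fuel with
  | zero =>
    intro parent x hInv hx hf
    split at hf <;> omega
  | succ fuel ih =>
    intro parent x hInv hx hf
    have hk : pvNIdx parent.length x < parent.length := pvNIdx_lt _ x hx
    have hget := pvGet?_norm parent x hx
    have hpxrng := hInv.rng _ hk
    by_cases hpxx : pvGet parent (pvNIdx parent.length x) = x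
    · -- parent[x] == x: x is a root
      have hx0 : 0 ≤ x := by have := hpxrng.1; omega
      have hxk : x = ((pvNIdx parent.length x : Nat) : Int) := by
        rw [pvNIdx_of_nonneg _ _ hx0]; omega
      have hfixk : pvGet labels (pvNIdx parent.length x) = ((pvNIdx parent.length x : Nat) : Int) :=
        hInv.fix _ hk (by rw [hpxx]; exact hxk)
      have heq : pvFindA (fuel + 1) parent x = (pvGet parent (pvNIdx parent.length x), parent) := by
        simp [pvFindA, hget, hpxx]
      rw [heq]
      refine ⟨?_, hInv, rfl, ?_⟩
      · show pvGet parent (pvNIdx parent.length x) = pvGet labels (pvNIdx parent.length x)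
        rw [hpxx, hfixk]; exact hxk
      · rw [hfixk]; simp
    · -- recurse on parent[x]
      have hpx0 : 0 ≤ pvGet parent (pvNIdx parent.length x) := hpxrng.1
      have hpxr : PySem.Raise.InRange parent.length (pvGet parent (pvNIdx parent.length x)) :=
        ⟨by omega, hpxrng.2⟩
      have hpxnn : pvNIdx parent.length (pvGet parent (pvNIdx parent.length x))
          = (pvGet parent (pvNIdx parent.length x)).toNat := pvNIdx_of_nonneg _ _ hpx0
      have hdpx : (if 0 ≤ pvGet parent (pvNIdx parent.length x) then
          d (pvNIdx parent.length (pvGet parent (pvNIdx parent.length x))) + 1 else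
          d (pvNIdx parent.length (pvGet parent (pvNIdx parent.length x))) + 2) ≤ fuel := by
        rw [if_pos hpx0, hpxnn]
        by_cases hx0 : 0 ≤ x
        · have hxk : x = ((pvNIdx parent.length x : Nat) : Int) := by
            rw [pvNIdx_of_nonneg _ _ hx0]; omega
          have hw := hInv.wf _ hk (by rw [← hxk]; exact hpxx)
          rw [if_pos hx0] at hf; omega
        · rw [if_neg hx0] at hf
          by_cases hpk : pvGet parent (pvNIdx parent.length x) = ((pvNIdx parent.length x : Nat) : Int)
          · rw [hpk]; simp; omega
          · have hw := hInv.wf _ hk hpk; omega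
      obtain ⟨ihv, ihInv, ihlen, ihd⟩ := ih parent (pvGet parent (pvNIdx parent.length x)) hInv hpxr hdpx
      rw [hpxnn] at ihv ihd
      obtain ⟨r, p1, hrp⟩ : ∃ r p1, pvFindA fuel parent (pvGet parent (pvNIdx parent.length x)) = (r, p1) :=
        ⟨_, _, rfl⟩
      rw [hrp] at ihv ihInv ihlen
      dsimp only at ihv ihInv ihlen
      have heq : pvFindA (fuel + 1) parent x =
          (PySem.List.pyGetD (PySem.List.pySetD p1 x r) x 0, PySem.List.pySetD p1 x r) := by
        simp [pvFindA, hget, hpxx, hrp]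
      have hxr1 : PySem.Raise.InRange p1.length x := by rw [ihlen]; exact hx
      have hn1 : pvNIdx p1.length x = pvNIdx parent.length x := by rw [ihlen]
      have hset : PySem.List.pySetD p1 x r = p1.set (pvNIdx parent.length x) r := by
        rw [pvSetD_norm p1 x r hxr1, hn1]
      have hrk : r = pvGet labels (pvNIdx parent.length x) := by
        rw [ihv, hInv.lab _ hk]
      have hd : r = ((pvNIdx parent.length x : Nat) : Int) ∨ d r.toNat < d (pvNIdx parent.length x) := by
        by_cases hpk : pvGet parent (pvNIdx parent.length x) = ((pvNIdx parent.length x : Nat) : Int)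
        · left; rw [hrk]; exact hInv.fix _ hk hpk
        · right
          have hw := hInv.wf _ hk hpk
          rw [← ihv] at ihd; omega
      have hk1 : pvNIdx parent.length x < p1.length := by rw [ihlen]; exact hk
      have hInv2 : pvInv (p1.set (pvNIdx parent.length x) r) labels d :=
        pvInv_compress p1 labels d ihInv _ hk1 r hrk hd
      have hval : PySem.List.pyGetD (PySem.List.pySetD p1 x r) x 0 = r := by
        rw [hset, pvGetD_norm _ x 0 (by simpa using hxr1)]
        rw [show pvNIdx (p1.set (pvNIdx parent.length x) r).length x = pvNIdx parent.length x by
          simpa using hn1]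
        exact pvGet_set_self p1 _ r hk1
      rw [heq]
      refine ⟨?_, ?_, ?_, ?_⟩
      · show PySem.List.pyGetD (PySem.List.pySetD p1 x r) x 0 = _
        rw [hval, hrk]
      · show pvInv (PySem.List.pySetD p1 x r) labels d
        rw [hset]; exact hInv2
      · show (PySem.List.pySetD p1 x r).length = parent.length
        rw [hset]; simp [ihlen]
      rcases hd with h | h
      · rw [← hrk, h]; simp
      · rw [← hrk]; omega

-- merging the component labelled a (a root) into the component labelled b
-- (A: parent[a] = b; B: relabel a -> b) preserves the invariant with a new
-- certificate, shifted on the merged component and bounded by the new size.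
lemma pvInv_union (parent labels : List Int) (d : Nat → Nat) (hInv : pvInv parent labels d)
    (ia ib : Nat) (hia : ia < parent.length) (hib : ib < parent.length)
    (a b : Int) (ha : a = pvGet labels ia) (hb : b = pvGet labels ib) (hab : a ≠ b) :
    pvInv (parent.set a.toNat b) (labels.map (fun l => if l = a then b else l))
      (fun z => if pvGet labels z = a then d z + d b.toNat + 1 else d z) := by
  obtain ⟨len, rng, lrng, lab, root, fix, idem, wf, bnd⟩ := hInv
  have hA := lrng ia hia
  have hB := lrng ib hib
  have a0 : 0 ≤ a := ha ▸ hA.1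
  have aLt : a < (parent.length : Int) := ha ▸ hA.2
  have b0 : 0 ≤ b := hb ▸ hB.1
  have bLt : b < (parent.length : Int) := hb ▸ hB.2
  have hα : a.toNat < parent.length := by omega
  have hβ : b.toNat < parent.length := by omega
  have aα : ((a.toNat : Nat) : Int) = a := Int.toNat_of_nonneg a0
  have bβ : ((b.toNat : Nat) : Int) = b := Int.toNat_of_nonneg b0
  have labα : pvGet labels a.toNat = a := by rw [ha]; exact idem ia hia
  have labβ : pvGet labels b.toNat = b := by rw [hb]; exact idem ib hib
  have rootα : pvGet parent a.toNat = a := by rw [ha]; exact root ia hia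
  have rootβ : pvGet parent b.toNat = b := by rw [hb]; exact root ib hib
  have hαβ : a.toNat ≠ b.toNat := fun h => hab (by rw [← aα, ← bβ, h])
  have hsetlen : (parent.set a.toNat b).length = parent.length := by simp
  have hmaplen : (labels.map (fun l => if l = a then b else l)).length = labels.length := by simp
  have getP : ∀ m : Nat, pvGet (parent.set a.toNat b) m =
      if m = a.toNat then b else pvGet parent m := by
    intro m
    by_cases hm : m = a.toNat
    · subst hm; simp [pvGet_set_self _ _ _ hα]
    · simp [pvGet_set_ne _ _ _ _ hm, hm]
  have getL : ∀ m : Nat, m < labels.length →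
      pvGet (labels.map (fun l => if l = a then b else l)) m =
      if pvGet labels m = a then b else pvGet labels m := by
    intro m hm
    exact pvGet_map labels _ m hm
  -- index of a value of labels, as a Nat, is < length
  have lidx : ∀ m : Nat, m < parent.length → (pvGet labels m).toNat < parent.length := by
    intro m hm; have := lrng m hm; omega
  refine ⟨?_, ?_, ?_, ?_, ?_, ?_, ?_, ?_, ?_⟩ <;> simp only [hsetlen]
  · rw [hmaplen, len]
  · intro m hm
    rw [getP m]; split
    · omega
    · exact rng m hm
  · intro m hm
    rw [getL m (by omega)]; split
    · omega
    · exact lrng m hm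
  · intro m hm
    rw [getP m]
    by_cases hm1 : m = a.toNat
    · rw [if_pos hm1, getL b.toNat (by omega), getL m (by omega), labβ, hm1, labα]
      simp [Ne.symm hab]
    · rw [if_neg hm1, getL (pvGet parent m).toNat (by have := rng m hm; omega),
        getL m (by omega), lab m hm]
  · -- root: every label of the new array is a fixed point of the new parent
    intro m hm
    rw [getL m (by omega)]
    by_cases hm1 : pvGet labels m = a
    · rw [if_pos hm1, getP b.toNat, if_neg (Ne.symm hαβ), rootβ]
    · rw [if_neg hm1, getP (pvGet labels m).toNat]
      have hne : (pvGet labels m).toNat ≠ a.toNat := by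
        intro h
        apply hm1
        have := (lrng m hm).1
        omega
      rw [if_neg hne, root m hm]
  · -- fix: fixed points of the new parent are their own new label
    intro m hm hp
    rw [getP m] at hp
    by_cases hm1 : m = a.toNat
    · rw [if_pos hm1] at hp
      exact absurd (by rw [hp, hm1, aα]) hab
    · rw [if_neg hm1] at hp
      have hfix := fix m hm hp
      rw [getL m (by omega), hfix, if_neg (by intro h; apply hm1; omega)]
  · -- idem
    intro m hm
    rw [getL m (by omega)]
    by_cases hm1 : pvGet labels m = a
    · rw [if_pos hm1, getL b.toNat (by omega), labβ, if_neg (Ne.symm hab)]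
    · rw [if_neg hm1, getL (pvGet labels m).toNat (by have := lidx m hm; omega),
        idem m hm, if_neg hm1]
  · -- wf: the certificate still decreases along every parent edge
    intro m hm
    rw [getP m]
    by_cases hm1 : m = a.toNat
    · rw [if_pos hm1]
      intro _
      simp only [hm1]
      simp [labα, labβ, Ne.symm hab]
    · rw [if_neg hm1]
      intro hp
      have hw := wf m hm hp
      have hl := lab m hm
      simp only [hl]
      by_cases hm2 : pvGet labels m = a
      · simp [hm2]; omega
      · simp [hm2]; omega
  · -- bnd: the shifted certificate is below the merged component size
    intro m hm
    have hcb := pvCount_map_self labels a b hab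
    rw [getL m (by omega)]
    by_cases hm1 : pvGet labels m = a
    · have h1 := bnd m hm; rw [hm1] at h1
      have h2 := bnd b.toNat hβ; rw [labβ] at h2
      simp [hm1, hcb]
      omega
    · have h1 := bnd m hm
      by_cases hm2 : pvGet labels m = b
      · rw [hm2] at h1
        simp [hm2, hcb, Ne.symm hab]
        omega
      · simp only [if_neg hm1]
        rw [pvCount_map_ne labels a b _ hm1 hm2]
        simpa [hm1] using h1

-- one pass of the pair loop: A's union and B's relabel stay bisimilar
lemma pvLoop_step (parent labels : List Int) (d : Nat → Nat) (hInv : pvInv parent labels d)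
    (p : List Int) (h3 : p.length = 3)
    (hi : PySem.Raise.InRange parent.length (p.getD 0 0))
    (hj : PySem.Raise.InRange parent.length (p.getD 1 0)) :
    ∃ d', pvInv (pvLoopA parent p) (pvLoopB labels p) d' ∧
      (pvLoopA parent p).length = parent.length ∧
      (pvLoopB labels p).length = labels.length := by
  obtain ⟨i, j, w, rfl⟩ := List.length_eq_three.mp h3
  have hi' : PySem.Raise.InRange parent.length i := hi
  have hj' : PySem.Raise.InRange parent.length j := hj
  have hki := pvNIdx_lt parent.length i hi'
  have hkj := pvNIdx_lt parent.length j hj'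
  have hfu1 : (if 0 ≤ i then d (pvNIdx parent.length i) + 1 else d (pvNIdx parent.length i) + 2)
      ≤ parent.length + 1 := by
    have hb := hInv.bnd _ hki
    have hc := List.count_le_length (a := pvGet labels (pvNIdx parent.length i)) (l := labels)
    have hl := hInv.len
    split <;> omega
  obtain ⟨hv1, hInv1, hlen1, _⟩ := pvFindA_spec labels d (parent.length + 1) parent i hInv hi' hfu1
  obtain ⟨r1, p1, e1⟩ : ∃ r1 p1, pvFindA (parent.length + 1) parent i = (r1, p1) := ⟨_, _, rfl⟩
  rw [e1] at hv1 hInv1 hlen1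
  dsimp only at hv1 hInv1 hlen1
  have hj1 : PySem.Raise.InRange p1.length j := by rw [hlen1]; exact hj'
  have hn1 : pvNIdx p1.length j = pvNIdx parent.length j := by rw [hlen1]
  have hfu2 : (if 0 ≤ j then d (pvNIdx p1.length j) + 1 else d (pvNIdx p1.length j) + 2)
      ≤ p1.length + 1 := by
    rw [hn1, hlen1]
    have hb := hInv.bnd _ hkj
    have hc := List.count_le_length (a := pvGet labels (pvNIdx parent.length j)) (l := labels)
    have hl := hInv.len
    split <;> omega
  obtain ⟨hv2, hInv2, hlen2, _⟩ := pvFindA_spec labels d (p1.length + 1) p1 j hInv1 hj1 hfu2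
  obtain ⟨r2, p2, e2⟩ : ∃ r2 p2, pvFindA (p1.length + 1) p1 j = (r2, p2) := ⟨_, _, rfl⟩
  rw [e2] at hv2 hInv2 hlen2
  dsimp only at hv2 hInv2 hlen2
  rw [hn1] at hv2
  have hgi : PySem.List.pyGet? labels i = some (pvGet labels (pvNIdx parent.length i)) := by
    have := pvGet?_norm labels i (by rw [← hInv.len]; exact hi')
    rw [← hInv.len] at this
    exact this
  have hgj : PySem.List.pyGet? labels j = some (pvGet labels (pvNIdx parent.length j)) := by
    have := pvGet?_norm labels j (by rw [← hInv.len]; exact hj')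
    rw [← hInv.len] at this
    exact this
  have hUA : pvLoopA parent [i, j, w] = (if r1 ≠ r2 then PySem.List.pySetD p2 r1 r2 else p2) := by
    simp only [pvLoopA, pvUnionA, e1, e2]
  by_cases hab : pvGet labels (pvNIdx parent.length i) = pvGet labels (pvNIdx parent.length j)
  · -- same root: both sides unchanged
    have hr12 : r1 = r2 := by rw [hv1, hv2, hab]
    have hUA' : pvLoopA parent [i, j, w] = p2 := by rw [hUA, hr12]; simp
    have hLB : pvLoopB labels [i, j, w] = labels := by
      simp only [pvLoopB, hgi, hgj]
      rw [if_neg (by simpa using hab)]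
    exact ⟨d, by rw [hUA', hLB]; exact hInv2,
      by rw [hUA', hlen2, hlen1], by rw [hLB]⟩
  · have hr12 : r1 ≠ r2 := by rw [hv1, hv2]; exact hab
    have ha0 : 0 ≤ r1 := by rw [hv1]; exact (hInv.lrng _ hki).1
    have haLt : r1 < (p2.length : Int) := by
      rw [hv1, hlen2, hlen1]; exact (hInv.lrng _ hki).2
    have hsr : PySem.List.pySetD p2 r1 r2 = p2.set r1.toNat r2 := by
      rw [pvSetD_norm p2 r1 r2 ⟨by omega, haLt⟩, pvNIdx_of_nonneg _ _ ha0]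
    have hki2 : pvNIdx parent.length i < p2.length := by rw [hlen2, hlen1]; exact hki
    have hkj2 : pvNIdx parent.length j < p2.length := by rw [hlen2, hlen1]; exact hkj
    have hLB : pvLoopB labels [i, j, w] = labels.map
        (fun l => if l = pvGet labels (pvNIdx parent.length i)
                  then pvGet labels (pvNIdx parent.length j) else l) := by
      simp only [pvLoopB, hgi, hgj]
      rw [if_pos hab]
    refine ⟨fun z => if pvGet labels z = pvGet labels (pvNIdx parent.length i)
        then d z + d (pvGet labels (pvNIdx parent.length j)).toNat + 1 else d z, ?_, ?_, ?_⟩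
    · rw [hUA, if_pos hr12, hsr, hv1, hv2, hLB]
      exact pvInv_union p2 labels d hInv2 _ _ hki2 hkj2 _ _ rfl rfl hab
    · rw [hUA, if_pos hr12, hsr]
      simp [hlen2, hlen1]
    · rw [hLB]; simp

-- the whole pair loop keeps A's forest and B's labels bisimilar
lemma pvPhase1 : ∀ (pairs : List (List Int)) (parent labels : List Int) (d : Nat → Nat),
    pvInv parent labels d →
    (∀ p ∈ pairs, p.length = 3 ∧ PySem.Raise.InRange parent.length (p.getD 0 0) ∧
      PySem.Raise.InRange parent.length (p.getD 1 0)) →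
    ∃ d', pvInv (pairs.foldl pvLoopA parent) (pairs.foldl pvLoopB labels) d' ∧
      (pairs.foldl pvLoopA parent).length = parent.length ∧
      (pairs.foldl pvLoopB labels).length = labels.length := by
  intro pairs
  induction pairs with
  | nil => exact fun parent labels d hInv _ => ⟨d, hInv, rfl, rfl⟩
  | cons p ps ih =>
    intro parent labels d hInv hpre
    obtain ⟨h3, hi, hj⟩ := hpre p List.mem_cons_self
    obtain ⟨d1, hInv1, hlenA, hlenB⟩ := pvLoop_step parent labels d hInv p h3 hi hj
    have hpre' : ∀ q ∈ ps, q.length = 3 ∧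
        PySem.Raise.InRange (pvLoopA parent p).length (q.getD 0 0) ∧
        PySem.Raise.InRange (pvLoopA parent p).length (q.getD 1 0) := by
      intro q hq
      rw [hlenA]
      exact hpre q (List.mem_cons_of_mem _ hq)
    obtain ⟨d2, hInv2, hA2, hB2⟩ := ih (pvLoopA parent p) (pvLoopB labels p) d1 hInv1 hpre'
    exact ⟨d2, by simpa using hInv2, by simp only [List.foldl_cons]; rw [hA2, hlenA],
      by simp only [List.foldl_cons]; rw [hB2, hlenB]⟩

-- A's "if root not in dict: dict[root] = []; dict[root].append(i)" is
-- B's "dict.setdefault(l, []).append(i)"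
lemma pvDictStep (d0 : PySem.Dict Int (List Int)) (c i : Int) :
    (if d0.contains c then d0 else d0.insert c []).modify c [] (· ++ [i])
      = d0.modify c [] (· ++ [i]) := by
  by_cases h : d0.contains c = true
  · rw [if_pos h]
  · rw [if_neg (by simpa using h)]
    show (d0.insert c []).insert c _ = d0.insert c _
    rw [PySem.Dict.getD_insert_self, PySem.Dict.insert_insert_self,
      PySem.Dict.getD_of_not_contains d0 [] (by simpa using h)]

-- A's grouping loop builds the same dict as grouping by B's labels
lemma pvPhase2 (labels : List Int) (d : Nat → Nat) :
    ∀ (ks : List Nat) (parent : List Int) (dct : PySem.Dict Int (List Int)),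
    pvInv parent labels d → (∀ k ∈ ks, k < parent.length) →
    (ks.foldl (fun st k => pvGroupA st ((k : Nat) : Int)) (dct, parent)).1
      = ks.foldl (fun dd k => dd.modify (pvGet labels k) [] (· ++ [((k : Nat) : Int)])) dct := by
  intro ks
  induction ks with
  | nil => intro parent dct _ _; rfl
  | cons k t ih =>
    intro parent dct hInv hks
    have hk := hks k List.mem_cons_self
    have hkr : PySem.Raise.InRange parent.length (k : Int) := ⟨by omega, by exact_mod_cast hk⟩
    have hfu : (if 0 ≤ (k : Int) then d (pvNIdx parent.length (k : Int)) + 1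
        else d (pvNIdx parent.length (k : Int)) + 2) ≤ parent.length + 1 := by
      rw [if_pos (by positivity), pvNIdx_natCast]
      have hb := hInv.bnd k hk
      have hc := List.count_le_length (a := pvGet labels k) (l := labels)
      have hl := hInv.len
      omega
    obtain ⟨hv, hInv', hlen', _⟩ :=
      pvFindA_spec labels d (parent.length + 1) parent (k : Int) hInv hkr hfu
    rw [pvNIdx_natCast] at hv
    obtain ⟨r, p', e⟩ : ∃ r p', pvFindA (parent.length + 1) parent (k : Int) = (r, p') :=
      ⟨_, _, rfl⟩
    rw [e] at hv hInv' hlen'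
    have hstep : pvGroupA (dct, parent) (k : Int) =
        (dct.modify (pvGet labels k) [] (· ++ [(k : Int)]), p') := by
      simp only [pvGroupA, e]
      rw [← hv, pvDictStep]
    simp only [List.foldl_cons, hstep]
    rw [ih p' _ hInv' (by intro m hm; rw [hlen']; exact hks m (List.mem_cons_of_mem _ hm))]

-- B's grouping loop over enumerate(labels), as a fold over the index range
lemma pvEnumFold : ∀ (xs : List Int) (s : Int) (dct : PySem.Dict Int (List Int)),
    (PySem.List.enumerate xs s).foldl pvGroupB dct
      = (List.range xs.length).foldl
          (fun dd k => dd.modify (pvGet xs k) [] (· ++ [s + (k : Int)])) dct := by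
  intro xs
  induction xs with
  | nil => intro s dct; rfl
  | cons x t ih =>
    intro s dct
    have he : PySem.List.enumerate (x :: t) s = (s, x) :: PySem.List.enumerate t (s + 1) := rfl
    rw [he, List.foldl_cons, ih (s + 1)]
    rw [List.length_cons, List.range_succ_eq_map, List.foldl_cons, List.foldl_map]
    have h0 : dct.modify (pvGet (x :: t) 0) [] (· ++ [s + ((0 : Nat) : Int)])
        = pvGroupB dct (s, x) := by
      simp [pvGet, pvGroupB]
    rw [h0]
    apply PySem.List.foldl_congr_mem
    intro acc m _
    show acc.modify (pvGet t m) [] (· ++ [(s + 1) + (m : Int)])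
        = acc.modify (pvGet (x :: t) (m + 1)) [] (· ++ [s + ((m + 1 : Nat) : Int)])
    have h1 : pvGet (x :: t) (m + 1) = pvGet t m := by simp [pvGet]
    have h2 : s + ((m + 1 : Nat) : Int) = (s + 1) + (m : Int) := by push_cast; ring
    rw [h1, h2]

-- the initial state: parent = labels = range(n), certificate 0
lemma pvInv_init (n : Int) :
    pvInv (PySem.List.pyRange 0 n 1) (PySem.List.pyRange 0 n 1) (fun _ => 0) := by
  have hget : ∀ k, k < (PySem.List.pyRange 0 n 1).length →
      pvGet (PySem.List.pyRange 0 n 1) k = (k : Int) := by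
    intro k hk
    rw [pvGet_eq _ _ hk, PySem.List.getElem_pyRange_one]
    simp
  have hlen : (PySem.List.pyRange 0 n 1).length = n.toNat := by
    rw [PySem.List.length_pyRange_one]; simp
  refine ⟨rfl, ?_, ?_, ?_, ?_, ?_, ?_, ?_, ?_⟩ <;> intro k hk
  · rw [hget k hk]; constructor <;> [positivity; exact_mod_cast hk]
  · rw [hget k hk]; constructor <;> [positivity; exact_mod_cast hk]
  · rw [hget k hk]; simp [hget k hk]
  · rw [hget k hk]; simp [hget k hk]
  · intro _; exact hget k hk
  · rw [hget k hk]; simp [hget k hk]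
  · intro hne; exact absurd (hget k hk) hne
  · rw [hget k hk]
    have hm : (k : Int) ∈ PySem.List.pyRange 0 n 1 := by
      rw [PySem.List.mem_pyRange_one]
      constructor <;> [positivity; (rw [hlen] at hk; omega)]
    have := List.count_eq_one_of_mem (PySem.List.nodup_pyRange_one 0 n) hm
    omega


-- ===== VERDICT (by name: the statement is the Claim_ definition above) =====
theorem cluster_entities_simple_py_spec : Claim_equal_cluster_entities_simple_py := by
  intro n pairs _ hpre
  unfold Spec_cluster_entities_simple_py
  unfold cluster_entities_simple_py cluster_entities_simple_py_alt
  have hlen0 : (PySem.List.pyRange 0 n 1).length = n.toNat := by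
    rw [PySem.List.length_pyRange_one]; simp
  have hpre' : ∀ p ∈ pairs, p.length = 3 ∧
      PySem.Raise.InRange (PySem.List.pyRange 0 n 1).length (p.getD 0 0) ∧
      PySem.Raise.InRange (PySem.List.pyRange 0 n 1).length (p.getD 1 0) := by
    intro p hp
    rw [hlen0]
    exact hpre p hp
  obtain ⟨d1, hInv1, hlenA, hlenB⟩ :=
    pvPhase1 pairs (PySem.List.pyRange 0 n 1) (PySem.List.pyRange 0 n 1)
      (fun _ => 0) (pvInv_init n) hpre'
  set P := pairs.foldl pvLoopA (PySem.List.pyRange 0 n 1) with hP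
  set L2 := pairs.foldl pvLoopB (PySem.List.pyRange 0 n 1) with hL2
  have hPlen : P.length = n.toNat := by rw [hlenA, hlen0]
  have hL2len : L2.length = n.toNat := by rw [hlenB, hlen0]
  show ((PySem.List.pyRange 0 n 1).foldl pvGroupA (PySem.Dict.empty, P)).1.values
      = ((PySem.List.enumerate L2).foldl pvGroupB PySem.Dict.empty).values
  have hA : ((PySem.List.pyRange 0 n 1).foldl pvGroupA (PySem.Dict.empty, P)).1
      = (List.range n.toNat).foldl
          (fun dd k => dd.modify (pvGet L2 k) [] (· ++ [((k : Nat) : Int)])) PySem.Dict.empty := by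
    rw [PySem.List.pyRange_one 0 n, List.foldl_map]
    simp only [sub_zero]
    rw [PySem.List.foldl_congr_mem (List.range n.toNat) _
      (fun st (k : Nat) => pvGroupA st ((k : Nat) : Int)) (PySem.Dict.empty, P)
      (by intro acc m _; rw [zero_add])]
    exact pvPhase2 L2 d1 (List.range n.toNat) P PySem.Dict.empty hInv1
      (by intro m hm; rw [hPlen]; exact List.mem_range.mp hm)
  have hB : (PySem.List.enumerate L2).foldl pvGroupB PySem.Dict.empty
      = (List.range n.toNat).foldl
          (fun dd k => dd.modify (pvGet L2 k) [] (· ++ [((k : Nat) : Int)])) PySem.Dict.empty := by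
    rw [pvEnumFold L2 0 PySem.Dict.empty, hL2len]
    apply PySem.List.foldl_congr_mem
    intro acc m _
    rw [zero_add]
  rw [hA, hB]
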